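-- pv_equiv track=rewrite | github.com/subhashtodkari/py_tutorials | com/subhash/hackerrank/practice/interview_prep_kit/dynamic_prog/decibinary.py | decibinary_to_decimal
-- ===== SOURCE A (Python) =====
-- def decibinary_to_decimal(db):
--     pos = 0
--     val = db
--     decimal = 0
--     while val > 0:
--         decimal += (val % 10) * (1 << pos)
--         pos += 1
--         val = val // 10
--     return decimal
-- ===== SOURCE B (Python) =====
-- def decibinary_to_decimal(db):
--     if db <= 0:
--         return 0
--     return decibinary_to_decimal(db // 10) * 2 + db % 10
-- ===== Notes on version B (the rewrite author's own statement) =====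
-- stated objective: alternative
-- what changed: Replaced the least-significant-first while loop that sums digit*(1<<pos) with a power-of-two accumulator by a most-significant-first Horner recursion (result*2 + digit) with no position counter.
import Mathlib
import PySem

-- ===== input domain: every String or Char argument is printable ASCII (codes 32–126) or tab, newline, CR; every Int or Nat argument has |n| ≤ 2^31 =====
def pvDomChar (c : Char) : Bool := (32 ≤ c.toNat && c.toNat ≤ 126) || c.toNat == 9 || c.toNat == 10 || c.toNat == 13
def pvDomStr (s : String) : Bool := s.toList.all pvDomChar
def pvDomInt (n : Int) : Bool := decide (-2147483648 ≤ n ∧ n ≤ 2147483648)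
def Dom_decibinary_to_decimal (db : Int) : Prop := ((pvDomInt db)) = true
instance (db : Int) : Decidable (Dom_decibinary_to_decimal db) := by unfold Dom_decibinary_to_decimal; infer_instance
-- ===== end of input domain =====

-- B replaces A's least-significant-first loop (digit * (1 << pos) with a position counter)
-- by a most-significant-first Horner recursion (acc * 2 + digit); same values, same cost.

-- termination measure lemma for both ports (cited by name in decreasing_by)
theorem pv_fd10_toNat_lt (val : Int) (h : 0 < val) :
    (PySem.Int.floordiv val 10).toNat < val.toNat := by
  rw [PySem.Int.floordiv_eq_ediv_of_pos (by omega : (0:Int) < 10)]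
  omega

-- ===== PORT A =====
-- the while loop, with its state (pos, val, decimal); '1 << pos' is '(1 : Int) <<< pos'
def pvLoopA (pos : Nat) (val decimal : Int) : Int :=
  if h : val > 0 then
    pvLoopA (pos + 1) (PySem.Int.floordiv val 10)
      (decimal + PySem.Int.mod val 10 * ((1 : Int) <<< pos))
  else decimal
termination_by val.toNat
decreasing_by exact pv_fd10_toNat_lt _ h

def decibinary_to_decimal (db : Int) : Int := pvLoopA 0 db 0

-- ===== PORT B =====
def decibinary_to_decimal_alt (db : Int) : Int :=
  if _h : db ≤ 0 then 0
  else decibinary_to_decimal_alt (PySem.Int.floordiv db 10) * 2 + PySem.Int.mod db 10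
termination_by db.toNat
decreasing_by exact pv_fd10_toNat_lt _ (by omega)

-- ===== PRECONDITION & SPEC =====
def Spec_decibinary_to_decimal (db : Int) (out : Int) : Prop := out = decibinary_to_decimal_alt db
instance (db : Int) (out : Int) : Decidable (Spec_decibinary_to_decimal db out) := by unfold Spec_decibinary_to_decimal; infer_instance

-- ===== CLAIM (what is proved, stated in full; the proofs are below) =====
def Claim_equal_decibinary_to_decimal : Prop := ∀ (db : Int), Dom_decibinary_to_decimal db → Spec_decibinary_to_decimal db (decibinary_to_decimal db)

-- ===== LEMMAS AND PROOFS =====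

theorem pv_shift_succ (pos : Nat) : ((1 : Int) <<< (pos + 1)) = ((1 : Int) <<< pos) * 2 := by
  simp [Int.shiftLeft_eq, pow_succ]

-- loop invariant: the loop adds 2^pos times the Horner value of val
theorem pv_loopA_eq (val : Int) : ∀ (pos : Nat) (decimal : Int),
    pvLoopA pos val decimal = decimal + ((1 : Int) <<< pos) * decibinary_to_decimal_alt val := by
  induction hn : val.toNat using Nat.strong_induction_on generalizing val with
  | _ n ih =>
    intro pos decimal
    rw [pvLoopA, decibinary_to_decimal_alt]
    by_cases h : val > 0
    · simp only [h, dif_pos, dif_neg (by omega : ¬ val ≤ 0)]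
      rw [ih _ (hn ▸ pv_fd10_toNat_lt val h) _ rfl, pv_shift_succ]
      ring
    · rw [dif_neg h, dif_pos (by omega : val ≤ 0)]
      ring

-- ===== VERDICT (by name: the statement is the Claim_ definition above) =====
theorem decibinary_to_decimal_spec : Claim_equal_decibinary_to_decimal := by
  intro db _
  unfold Spec_decibinary_to_decimal decibinary_to_decimal
  rw [pv_loopA_eq]
  simp
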